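-- pv_equiv track=rewrite | github.com/BuffaloHat/soapy-groovegraph-public | apps/itunes_image.py | resolve_hero
-- ===== SOURCE A (Python) =====
-- from typing import Optional
--
-- def _cache_key(artist: str, album: str) -> str:
--     return f"{artist.lower().strip()}|{album.lower().strip()}"
--
-- def get_artwork_url(artist: str, album: str, cache: dict) -> Optional[str]:
--     return cache.get(_cache_key(artist, album))
--
-- def resolve_hero(results: list, cache: dict) -> tuple:
--     """
--     Given a list of top-k result dicts (each with 'artist' and 'album' keys),
--     returns (hero, remaining) where hero is the first result with a valid
--     cached image and remaining is the rest in original order (hero excluded).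
--     Falls back to results[0] as hero with no image if none have art.
--     """
--     hero = None
--     hero_idx = None
--
--     for i, result in enumerate(results):
--         url = get_artwork_url(result.get("artist", ""), result.get("album", ""), cache)
--         if url:
--             hero = {**result, "artwork_url": url}
--             hero_idx = i
--             break
--
--     if hero is None and results:
--         hero = {**results[0], "artwork_url": None}
--         hero_idx = 0
--
--     remaining = [r for i, r in enumerate(results) if i != hero_idx]
--     return hero, remaining
-- ===== SOURCE B (Python) =====
-- from typing import Optional
--
--
-- def _cache_key(artist: str, album: str) -> str:
--     return f"{artist.lower().strip()}|{album.lower().strip()}"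
--
--
-- def get_artwork_url(artist: str, album: str, cache: dict) -> Optional[str]:
--     return cache.get(_cache_key(artist, album))
--
--
-- def resolve_hero(results: list, cache: dict) -> tuple:
--     """Single pass: collect `remaining` while hunting for the hero, instead of
--     a break-loop followed by an index-filtering second pass."""
--     hero = None
--     remaining = []
--     for r in results:
--         if hero is None:
--             url = get_artwork_url(r.get("artist", ""), r.get("album", ""), cache)
--             if url:
--                 hero = {**r, "artwork_url": url}
--                 continue
--         remaining.append(r)
--     if hero is None and results:
--         hero = {**results[0], "artwork_url": None}
--         remaining = remaining[1:]
--     return hero, remaining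
-- ===== Notes on version B (the rewrite author's own statement) =====
-- stated objective: simpler
-- what changed: Replaced A's break-loop plus a second index-filtering enumerate pass with a single pass that collects the remaining list while hunting for the hero (fallback drops the already-collected first element).
import Mathlib
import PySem

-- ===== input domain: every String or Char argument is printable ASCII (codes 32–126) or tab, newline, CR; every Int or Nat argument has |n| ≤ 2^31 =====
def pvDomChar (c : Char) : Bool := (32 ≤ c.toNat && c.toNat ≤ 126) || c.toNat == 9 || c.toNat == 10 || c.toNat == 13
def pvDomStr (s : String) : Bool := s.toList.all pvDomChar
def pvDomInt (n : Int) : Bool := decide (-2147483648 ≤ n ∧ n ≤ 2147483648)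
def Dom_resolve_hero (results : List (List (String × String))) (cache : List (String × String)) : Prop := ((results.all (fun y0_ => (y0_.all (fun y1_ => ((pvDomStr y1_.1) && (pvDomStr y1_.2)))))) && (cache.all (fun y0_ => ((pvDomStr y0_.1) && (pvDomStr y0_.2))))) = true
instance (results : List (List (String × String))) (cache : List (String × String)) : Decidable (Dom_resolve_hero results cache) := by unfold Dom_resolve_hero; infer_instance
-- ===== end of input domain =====

-- B collapses A's break-loop + second index-filtering pass into one pass that also
-- builds `remaining`; objective: simpler (one traversal, no index bookkeeping).

-- ===== PORT A =====
-- shared helpers of the module (both Python versions define them identically)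
def pv_cache_key (artist album : String) : String :=
  PySem.Str.strip (PySem.Str.lower artist) ++ "|" ++ PySem.Str.strip (PySem.Str.lower album)

def pv_get_artwork_url (artist album : String) (cache : List (String × String)) : Option String :=
  (PySem.Dict.mk cache).get? (pv_cache_key artist album)

-- `if url:` — an Optional[str] is truthy iff it is a non-empty string
def pvTruthy (o : Option String) : Bool :=
  match o with
  | some s => decide (s ≠ "")
  | none => false

-- {**result, "artwork_url": url}
def pvMergeHero (r : List (String × String)) (url : Option String) : List (String × Option String) :=
  (PySem.Dict.insert (PySem.Dict.mk (r.map (fun p => (p.1, some p.2)))) "artwork_url" url).items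

-- the for/enumerate loop with break: first (i, merged hero) whose url is truthy
def findHeroA (cache : List (String × String)) :
    List (Int × List (String × String)) → Option (Int × List (String × Option String))
  | [] => none
  | (i, r) :: rest =>
    let url := pv_get_artwork_url ((PySem.Dict.mk r).getD "artist" "") ((PySem.Dict.mk r).getD "album" "") cache
    if pvTruthy url then some (i, pvMergeHero r url) else findHeroA cache rest

def resolve_hero (results : List (List (String × String))) (cache : List (String × String)) : (Option (List (String × Option String))) × (List (List (String × String))) :=
  let found := findHeroA cache (PySem.List.enumerate results 0)
  let hh : Option (List (String × Option String)) × Option Int :=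
    match found with
    | some (i, h) => (some h, some i)
    | none =>
      match results with
      | [] => (none, none)
      | r0 :: _ => (some (pvMergeHero r0 none), some 0)
  -- [r for i, r in enumerate(results) if i != hero_idx]  (i != None is always true)
  (hh.1, (PySem.List.enumerate results 0).filterMap (fun p => if (some p.1 = hh.2) then none else some p.2))

-- ===== PORT B =====
-- one pass: hero accumulator + remaining accumulator
def loopB (cache : List (String × String)) :
    List (List (String × String)) → Option (List (String × Option String)) →
    List (List (String × String)) → (Option (List (String × Option String))) × (List (List (String × String)))
  | [], hero, rem => (hero, rem)
  | r :: rest, hero, rem =>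
    match hero with
    | none =>
      let url := pv_get_artwork_url ((PySem.Dict.mk r).getD "artist" "") ((PySem.Dict.mk r).getD "album" "") cache
      if pvTruthy url then loopB cache rest (some (pvMergeHero r url)) rem
      else loopB cache rest none (rem ++ [r])
    | some h => loopB cache rest (some h) (rem ++ [r])

def resolve_hero_alt (results : List (List (String × String))) (cache : List (String × String)) : (Option (List (String × Option String))) × (List (List (String × String))) :=
  let hr := loopB cache results none []
  match hr.1 with
  | some h => (some h, hr.2)
  | none =>
    match results with
    | [] => (none, hr.2)
    | r0 :: _ => (some (pvMergeHero r0 none), hr.2.drop 1)  -- remaining[1:]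

-- ===== PRECONDITION & SPEC =====
def Spec_resolve_hero (results : List (List (String × String))) (cache : List (String × String)) (out : (Option (List (String × Option String))) × (List (List (String × String)))) : Prop := out = resolve_hero_alt results cache
instance (results : List (List (String × String))) (cache : List (String × String)) (out : (Option (List (String × Option String))) × (List (List (String × String)))) : Decidable (Spec_resolve_hero results cache out) := by unfold Spec_resolve_hero; infer_instance

-- ===== CLAIM (what is proved, stated in full; the proofs are below) =====
def Claim_equal_resolve_hero : Prop := ∀ (results : List (List (String × String))) (cache : List (String × String)), Dom_resolve_hero results cache → Spec_resolve_hero results cache (resolve_hero results cache)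

-- ===== LEMMAS AND PROOFS =====

-- once the hero is found, B's loop just appends everything left
theorem loopB_some (cache : List (String × String)) (xs : List (List (String × String)))
    (h : List (String × Option String)) (acc : List (List (String × String))) :
    loopB cache xs (some h) acc = (some h, acc ++ xs) := by
  induction xs generalizing acc with
  | nil => simp [loopB]
  | cons r rest ih => simp [loopB, ih]

-- the index-filter over an enumerate whose indices all exceed i keeps everything
theorem filter_enum_all (xs : List (List (String × String))) (n i : Int) (hni : i < n) :
    (PySem.List.enumerate xs n).filterMap
      (fun p => if (some p.1 = some i) then none else some p.2) = xs := by
  induction xs generalizing n with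
  | nil => simp [PySem.List.enumerate_nil]
  | cons r rest ih =>
    rw [PySem.List.enumerate_cons]
    simp only [List.filterMap_cons]
    have hne : ¬ (some n = some i) := by simp; omega
    simp only [if_neg hne]
    rw [ih (n + 1) (by omega)]

-- main invariant linking A's break-search with B's single pass
theorem main_inv (cache : List (String × String)) (xs : List (List (String × String)))
    (n : Int) (acc : List (List (String × String))) :
    (findHeroA cache (PySem.List.enumerate xs n) = none →
      loopB cache xs none acc = (none, acc ++ xs)) ∧
    (∀ i h, findHeroA cache (PySem.List.enumerate xs n) = some (i, h) →
      n ≤ i ∧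
      loopB cache xs none acc =
        (some h, acc ++ (PySem.List.enumerate xs n).filterMap
          (fun p => if (some p.1 = some i) then none else some p.2))) := by
  induction xs generalizing n acc with
  | nil =>
    constructor
    · intro _; simp [loopB]
    · intro i h hfind; rw [PySem.List.enumerate_nil] at hfind; simp [findHeroA] at hfind
  | cons r rest ih =>
    rw [PySem.List.enumerate_cons]
    by_cases ht : pvTruthy (pv_get_artwork_url ((PySem.Dict.mk r).getD "artist" "") ((PySem.Dict.mk r).getD "album" "") cache) = true
    · constructor
      · intro hfind; simp [findHeroA, ht] at hfind
      · intro i h hfind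
        simp only [findHeroA, ht, if_pos] at hfind
        obtain ⟨hi, hh⟩ := Prod.mk.injEq .. ▸ Option.some.injEq .. ▸ hfind
        subst hi; subst hh
        refine ⟨le_refl _, ?_⟩
        simp only [loopB, ht, if_pos, loopB_some]
        simp only [List.filterMap_cons]
        rw [filter_enum_all rest (n + 1) n (by omega)]
        simp
    · have hKey : findHeroA cache ((n, r) :: PySem.List.enumerate rest (n + 1))
          = findHeroA cache (PySem.List.enumerate rest (n + 1)) := by
        simp [findHeroA, ht]
      have hStep : loopB cache (r :: rest) none acc = loopB cache rest none (acc ++ [r]) := by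
        simp [loopB, ht]
      constructor
      · intro hfind
        rw [hKey] at hfind
        rw [hStep, (ih (n + 1) (acc ++ [r])).1 hfind]
        simp
      · intro i h hfind
        rw [hKey] at hfind
        obtain ⟨hni, hB⟩ := (ih (n + 1) (acc ++ [r])).2 i h hfind
        refine ⟨by omega, ?_⟩
        rw [hStep, hB]
        have hne : ¬ n = i := by omega
        simp [hne]

-- ===== VERDICT (by name: the statement is the Claim_ definition above) =====
theorem resolve_hero_spec : Claim_equal_resolve_hero := by
  intro results cache _
  show resolve_hero results cache = resolve_hero_alt results cache
  unfold resolve_hero resolve_hero_alt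
  cases hfind : findHeroA cache (PySem.List.enumerate results 0) with
  | some ih =>
    obtain ⟨i, h⟩ := ih
    obtain ⟨_, hB⟩ := (main_inv cache results 0 []).2 i h hfind
    simp only [hB, List.nil_append]
  | none =>
    have hB := (main_inv cache results 0 []).1 hfind
    simp only [hB, List.nil_append]
    cases results with
    | nil => simp [PySem.List.enumerate_nil]
    | cons r0 rest =>
      rw [PySem.List.enumerate_cons]
      simp only [List.filterMap_cons, List.drop_succ_cons, List.drop_zero]
      rw [show (0:Int) + 1 = 1 by norm_num, filter_enum_all rest 1 0 (by omega)]
      simp
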